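-- pv_equiv track=rewrite | github.com/OneTrickPony82/Bridge-Tools | bridgetools.py | onesided
-- ===== SOURCE A (Python) =====
-- def onesided(bidding):
--     even = False
--     odd = False
--     count = 0
--     for b in bidding:
--         if count == 0:
--             if b != 'p':
--                 even = True
--         if count == 1:
--             if b != 'p':
--                 odd = True
--         count = (count + 1) % 2
--     return odd != even
-- ===== SOURCE B (Python) =====
-- def onesided(bidding):
--     even = any(b != 'p' for b in bidding[0::2])
--     odd = any(b != 'p' for b in bidding[1::2])
--     return even != odd
-- ===== Notes on version B (the rewrite author's own statement) =====
-- stated objective: simpler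
-- what changed: Replaces the single interleaved pass with a toggling parity counter by two separate any() passes over the even- and odd-indexed slices (slicing and any run in C, removing per-element branching).
import Mathlib
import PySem

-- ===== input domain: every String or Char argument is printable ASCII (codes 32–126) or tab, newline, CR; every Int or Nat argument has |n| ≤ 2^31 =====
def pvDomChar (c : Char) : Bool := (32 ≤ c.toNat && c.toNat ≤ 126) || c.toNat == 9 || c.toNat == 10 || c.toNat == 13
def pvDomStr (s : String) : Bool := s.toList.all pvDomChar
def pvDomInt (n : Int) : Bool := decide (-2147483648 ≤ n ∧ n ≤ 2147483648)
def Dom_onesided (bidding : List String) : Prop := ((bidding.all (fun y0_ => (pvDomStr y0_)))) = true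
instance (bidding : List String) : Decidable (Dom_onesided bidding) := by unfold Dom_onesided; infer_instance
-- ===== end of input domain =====

-- B replaces A's single pass with a toggling parity counter by two any() passes over the
-- even- and odd-indexed slices (objective: simpler).

-- ===== PORT A =====
def onesidedStep (s : Bool × Bool × Int) (b : String) : Bool × Bool × Int :=
  let even := if s.2.2 == 0 then (if b != "p" then true else s.1) else s.1
  let odd := if s.2.2 == 1 then (if b != "p" then true else s.2.1) else s.2.1
  (even, odd, PySem.Int.mod (s.2.2 + 1) 2)

def onesided (bidding : List String) : Bool :=
  let s := bidding.foldl onesidedStep (false, false, 0)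
  s.2.1 != s.1

-- ===== PORT B =====
-- bidding[0::2] / bidding[1::2]: every other element starting at index 0 / 1
def pvEveryOther : List String → List String
  | [] => []
  | [x] => [x]
  | x :: _ :: rest => x :: pvEveryOther rest

def onesided_alt (bidding : List String) : Bool :=
  let even := (pvEveryOther bidding).any (fun b => b != "p")
  let odd := (pvEveryOther (bidding.drop 1)).any (fun b => b != "p")
  even != odd

-- ===== PRECONDITION & SPEC =====
def Spec_onesided (bidding : List String) (out : Bool) : Prop := out = onesided_alt bidding
instance (bidding : List String) (out : Bool) : Decidable (Spec_onesided bidding out) := by unfold Spec_onesided; infer_instance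

-- ===== CLAIM (what is proved, stated in full; the proofs are below) =====
def Claim_equal_onesided : Prop := ∀ (bidding : List String), Dom_onesided bidding → Spec_onesided bidding (onesided bidding)

-- ===== LEMMAS AND PROOFS =====
theorem onesided_foldl_inv (l : List String) (e o : Bool) :
    (l.foldl onesidedStep (e, o, 0)).1 = (e || (pvEveryOther l).any (fun b => b != "p"))
    ∧ (l.foldl onesidedStep (e, o, 0)).2.1 = (o || (pvEveryOther (l.drop 1)).any (fun b => b != "p")) := by
  induction l using pvEveryOther.induct generalizing e o with
  | case1 => simp [pvEveryOther]
  | case2 x =>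
      simp [pvEveryOther, onesidedStep, PySem.Int.mod]
      cases e <;> by_cases h : x = "p" <;> simp [h]
  | case3 x y rest ih =>
      have step2 : (x :: y :: rest).foldl onesidedStep (e, o, 0)
          = rest.foldl onesidedStep ((e || (x != "p")), (o || (y != "p")), 0) := by
        simp only [List.foldl, onesidedStep, PySem.Int.mod]
        norm_num
        congr 2 <;> (cases e <;> cases o <;> by_cases h : x = "p" <;> by_cases h' : y = "p" <;> simp [h, h'])
      rw [step2]
      rcases ih (e || (x != "p")) (o || (y != "p")) with ⟨h1, h2⟩
      refine ⟨?_, ?_⟩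
      · rw [h1]; simp [pvEveryOther, Bool.or_assoc]
      · rw [h2]
        cases rest with
        | nil => simp [pvEveryOther]
        | cons z rs => simp [pvEveryOther, Bool.or_assoc]

-- ===== VERDICT (by name: the statement is the Claim_ definition above) =====
theorem onesided_spec : Claim_equal_onesided := by
  intro bidding _
  unfold Spec_onesided onesided onesided_alt
  rcases onesided_foldl_inv bidding false false with ⟨h1, h2⟩
  simp [h1, h2]
  cases hA : (pvEveryOther bidding).any (fun b => b != "p") <;>
    cases hB : (pvEveryOther (bidding.drop 1)).any (fun b => b != "p") <;> simp
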